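-- pv_equiv track=rewrite | github.com/vijai-mohan/Refrag2 | src/refrag/framework/apps/reconstruction.py | _pack_tokens
-- ===== SOURCE A (Python) =====
-- from typing import Dict, Iterable, Iterator, List, Tuple
--
-- def _pack_tokens(token_ids: List[int], compression: int, pad_id: int) -> Tuple[List[List[int]], List[List[int]]]:
--     rows: List[List[int]] = []
--     masks: List[List[int]] = []
--     for i in range(0, len(token_ids), compression):
--         chunk = token_ids[i : i + compression]
--         mask = [1] * len(chunk)
--         if len(chunk) < compression:
--             pad_len = compression - len(chunk)
--             chunk = chunk + [pad_id] * pad_len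
--             mask = mask + [0] * pad_len
--         rows.append(chunk)
--         masks.append(mask)
--     if not rows:
--         rows = [[pad_id] * compression]
--         masks = [[0] * compression]
--     return rows, masks
-- ===== SOURCE B (Python) =====
-- def _pack_tokens(token_ids, compression, pad_id):
--     starts = range(0, len(token_ids), compression)
--     if len(starts) == 0:
--         return [[pad_id] * compression], [[0] * compression]
--     total = len(starts) * compression
--     pad_len = total - len(token_ids)
--     padded = token_ids + [pad_id] * pad_len
--     flat = [1] * len(token_ids) + [0] * pad_len
--     rows = [padded[i:i + compression] for i in starts]
--     masks = [flat[i:i + compression] for i in starts]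
--     return rows, masks
-- ===== Notes on version B (the rewrite author's own statement) =====
-- stated objective: alternative
-- what changed: Instead of padding and masking each chunk inside the loop with a per-chunk branch, B pads the token list once globally to a multiple of the compression width, builds one flat mask, and produces all rows and masks by uniform slicing at the precomputed row starts.
import Mathlib
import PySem

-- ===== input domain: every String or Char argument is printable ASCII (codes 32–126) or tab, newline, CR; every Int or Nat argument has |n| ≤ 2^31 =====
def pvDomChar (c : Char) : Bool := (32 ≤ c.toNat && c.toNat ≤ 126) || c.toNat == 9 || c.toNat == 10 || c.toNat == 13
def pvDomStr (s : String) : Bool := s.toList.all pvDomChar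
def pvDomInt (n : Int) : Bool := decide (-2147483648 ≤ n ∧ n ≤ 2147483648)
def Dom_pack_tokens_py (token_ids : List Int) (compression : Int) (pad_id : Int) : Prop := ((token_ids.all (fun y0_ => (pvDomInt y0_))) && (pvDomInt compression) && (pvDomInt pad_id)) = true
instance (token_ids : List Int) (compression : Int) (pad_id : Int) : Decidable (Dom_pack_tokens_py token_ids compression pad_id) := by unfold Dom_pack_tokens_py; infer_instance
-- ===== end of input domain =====

-- B pads the token list once globally and produces every row and mask by uniform slicing
-- at the precomputed row starts, instead of A's per-chunk padding branch inside the loop.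


-- ===== PORT A =====
-- the body of A's for-loop: one (chunk, mask) pair per row start i
def pvStep (token_ids : List Int) (compression : Int) (pad_id : Int) (i : Int) : List Int × List Int :=
  let chunk := PySem.List.slice token_ids (some i) (some (i + compression))
  let mask := List.replicate chunk.length (1 : Int)
  if (chunk.length : Int) < compression then
    let pad_len := compression - (chunk.length : Int)
    (chunk ++ List.replicate pad_len.toNat pad_id, mask ++ List.replicate pad_len.toNat (0 : Int))
  else (chunk, mask)

def pack_tokens_py (token_ids : List Int) (compression : Int) (pad_id : Int) : List (List Int) × List (List Int) :=
  let rm := (PySem.List.pyRange 0 (token_ids.length : Int) compression).foldl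
    (fun (acc : List (List Int) × List (List Int)) i =>
      (acc.1 ++ [(pvStep token_ids compression pad_id i).1],
       acc.2 ++ [(pvStep token_ids compression pad_id i).2])) ([], [])
  if rm.1 = [] then
    ([List.replicate compression.toNat pad_id], [List.replicate compression.toNat (0 : Int)])
  else rm

-- ===== PORT B =====
def pack_tokens_py_alt (token_ids : List Int) (compression : Int) (pad_id : Int) : List (List Int) × List (List Int) :=
  let starts := PySem.List.pyRange 0 (token_ids.length : Int) compression
  if starts = [] then
    ([List.replicate compression.toNat pad_id], [List.replicate compression.toNat (0 : Int)])
  else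
    let total : Int := (starts.length : Int) * compression
    let pad_len := (total - (token_ids.length : Int)).toNat
    let padded := token_ids ++ List.replicate pad_len pad_id
    let flat := List.replicate token_ids.length (1 : Int) ++ List.replicate pad_len (0 : Int)
    (starts.map (fun i => PySem.List.slice padded (some i) (some (i + compression))),
     starts.map (fun i => PySem.List.slice flat (some i) (some (i + compression))))

-- ===== PRECONDITION & SPEC =====
-- Pre_ excludes exactly compression = 0, where Python's range(0, len, 0) raises ValueError.
def Pre_pack_tokens_py (token_ids : List Int) (compression : Int) (pad_id : Int) : Prop :=
  compression ≠ 0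
instance (token_ids : List Int) (compression : Int) (pad_id : Int) : Decidable (Pre_pack_tokens_py token_ids compression pad_id) := by unfold Pre_pack_tokens_py; infer_instance
def pvWitness_pack_tokens_py : List Int × Int × Int := ([1, 2, 3], 2, 0)

def Spec_pack_tokens_py (token_ids : List Int) (compression : Int) (pad_id : Int) (out : List (List Int) × List (List Int)) : Prop := out = pack_tokens_py_alt token_ids compression pad_id
instance (token_ids : List Int) (compression : Int) (pad_id : Int) (out : List (List Int) × List (List Int)) : Decidable (Spec_pack_tokens_py token_ids compression pad_id out) := by unfold Spec_pack_tokens_py; infer_instance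

-- ===== CLAIM (what is proved, stated in full; the proofs are below) =====
def Claim_equal_pack_tokens_py : Prop := ∀ (token_ids : List Int) (compression : Int) (pad_id : Int), Dom_pack_tokens_py token_ids compression pad_id → Pre_pack_tokens_py token_ids compression pad_id → Spec_pack_tokens_py token_ids compression pad_id (pack_tokens_py token_ids compression pad_id)

-- ===== LEMMAS AND PROOFS =====

-- slicing out of a right-padded list = the raw slice plus the needed padding
lemma pvSliceKey {α : Type} (xs : List α) (p : α) (a cc m : Nat)
    (ha : a ≤ xs.length) (hq : a + cc ≤ xs.length + m) :
    List.take cc (List.drop a (xs ++ List.replicate m p)) =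
      List.take cc (List.drop a xs) ++ List.replicate (cc - (xs.length - a)) p := by
  rw [List.drop_append_of_le_length ha, List.take_append, List.take_replicate,
      List.length_drop, Nat.min_eq_left (by omega)]

lemma pvNegCase (tid : List Int) (c : Int) (hc : c < 0) :
    PySem.List.pyRange 0 (tid.length : Int) c = [] := by
  simp only [PySem.List.pyRange, if_neg hc.ne]
  have h1 : ¬ (0 < c) := by omega
  have h2 : ¬ ((tid.length : Int) < 0) := by omega
  simp [h1, h2]

lemma pvRow (tid : List Int) (c pad i qc : Int) (hc : 0 < c) (hi : 0 ≤ i)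
    (hin : i < (tid.length : Int)) (hiq : i + c ≤ qc) (hnq : (tid.length : Int) ≤ qc) :
    pvStep tid c pad i =
      (PySem.List.slice (tid ++ List.replicate (qc - (tid.length : Int)).toNat pad) (some i) (some (i + c)),
       PySem.List.slice (List.replicate tid.length (1 : Int) ++ List.replicate (qc - (tid.length : Int)).toNat (0 : Int)) (some i) (some (i + c))) := by
  have hic : 0 ≤ i + c := by omega
  simp only [pvStep]
  rw [PySem.List.slice_toNat tid hi hic,
      PySem.List.slice_toNat (tid ++ List.replicate (qc - (tid.length : Int)).toNat pad) hi hic,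
      PySem.List.slice_toNat (List.replicate tid.length (1 : Int) ++ List.replicate (qc - (tid.length : Int)).toNat (0 : Int)) hi hic]
  have hac : (i + c).toNat - i.toNat = c.toNat := by omega
  rw [hac]
  rw [pvSliceKey tid pad i.toNat c.toNat _ (by omega) (by omega),
      pvSliceKey (List.replicate tid.length (1 : Int)) (0 : Int) i.toNat c.toNat _
        (by simp; omega) (by simp; omega)]
  simp only [List.length_replicate, List.drop_replicate, List.take_replicate]
  have hlen : (List.take c.toNat (List.drop i.toNat tid)).length = min c.toNat (tid.length - i.toNat) := by
    simp
  by_cases hcase : tid.length - i.toNat < c.toNat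
  · rw [if_pos (by rw [hlen]; push_cast; omega), hlen]
    have hcnt : (c - ((min c.toNat (tid.length - i.toNat) : Nat) : Int)).toNat
        = c.toNat - (tid.length - i.toNat) := by
      have := min_le_left c.toNat (tid.length - i.toNat)
      omega
    rw [hcnt]
  · rw [if_neg (by rw [hlen]; push_cast; omega), hlen]
    have h0 : c.toNat - (tid.length - i.toNat) = 0 := by omega
    rw [h0]
    simp

lemma pvMain (tid : List Int) (c pad : Int) (hc : 0 < c) (hn : tid ≠ []) :
    pack_tokens_py tid c pad = pack_tokens_py_alt tid c pad := by
  have hn0 : 0 < ((tid.length : Int)) := by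
    cases tid with
    | nil => exact absurd rfl hn
    | cons x xs => simp
  set n : Int := (tid.length : Int) with hndef
  set q : Nat := ((n - 0 + c - 1) / c).toNat with hqdef
  have hrep := PySem.List.pyRange_of_pos 0 n hc
  rw [if_pos hn0, ← hqdef] at hrep
  have hdnn : 0 ≤ (n - 0 + c - 1) / c := Int.ediv_nonneg (by omega) (le_of_lt hc)
  have hqint : (q : Int) = (n - 0 + c - 1) / c := by rw [hqdef]; exact Int.toNat_of_nonneg hdnn
  have hkey : (q : Int) * c = (n - 0 + c - 1) - (n - 0 + c - 1) % c := by
    rw [hqint]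
    have h := Int.mul_ediv_add_emod (n - 0 + c - 1) c
    linarith
  have hr1 := Int.emod_nonneg (n - 0 + c - 1) (ne_of_gt hc)
  have hr2 := Int.emod_lt_of_pos (n - 0 + c - 1) hc
  have hqc1 : n ≤ (q : Int) * c := by omega
  have hqc2 : (q : Int) * c ≤ n + c - 1 := by omega
  have hq0 : 0 < q := by
    rcases Nat.eq_zero_or_pos q with h | h
    · exfalso; rw [h] at hqc1; simp at hqc1; omega
    · exact h
  have hne : PySem.List.pyRange 0 n c ≠ [] := by
    rw [hrep]
    simp [List.range_eq_nil]
    omega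
  have hlen : ((PySem.List.pyRange 0 n c).length : Int) = (q : Int) := by
    rw [hrep]; simp
  have hpt : ∀ i ∈ PySem.List.pyRange 0 n c,
      pvStep tid c pad i =
        (PySem.List.slice (tid ++ List.replicate ((q : Int) * c - n).toNat pad) (some i) (some (i + c)),
         PySem.List.slice (List.replicate tid.length (1 : Int) ++ List.replicate ((q : Int) * c - n).toNat (0 : Int)) (some i) (some (i + c))) := by
    intro i hi
    rw [hrep] at hi
    obtain ⟨k, hk, rfl⟩ := List.mem_map.mp hi
    rw [List.mem_range] at hk
    have hk1 : (k : Int) + 1 ≤ (q : Int) := by exact_mod_cast hk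
    have hik : c * ((k : Int) + 1) ≤ c * (q : Int) := by
      exact mul_le_mul_of_nonneg_left hk1 (le_of_lt hc)
    have hi0 : (0 : Int) ≤ 0 + c * (k : Int) := by positivity
    have hiq : (0 + c * (k : Int)) + c ≤ (q : Int) * c := by nlinarith
    have hin : 0 + c * (k : Int) < n := by nlinarith
    exact pvRow tid c pad _ _ hc hi0 hin hiq hqc1
  simp only [pack_tokens_py, pack_tokens_py_alt]
  rw [PySem.List.foldl_prod_mk
        (fun (s : List (List Int)) (i : Int) => s ++ [(pvStep tid c pad i).1])
        (fun (s : List (List Int)) (i : Int) => s ++ [(pvStep tid c pad i).2]),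
      PySem.List.foldl_append_singleton_eq_map, PySem.List.foldl_append_singleton_eq_map]
  simp only [List.nil_append]
  rw [if_neg (by simpa using hne), if_neg hne]
  have htotal : ((PySem.List.pyRange 0 n c).length : Int) * c = (q : Int) * c := by
    rw [hlen]
  rw [htotal]
  simp only [Prod.mk.injEq]
  constructor
  · apply List.map_congr_left; intro i hi
    exact congrArg Prod.fst (hpt i hi)
  · apply List.map_congr_left; intro i hi
    exact congrArg Prod.snd (hpt i hi)

-- ===== VERDICT (by name: the statement is the Claim_ definition above) =====
theorem pack_tokens_py_spec : Claim_equal_pack_tokens_py := by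
  intro tid c pad _ hpre
  unfold Spec_pack_tokens_py
  rcases lt_trichotomy c 0 with hc | hc | hc
  · have h0 := pvNegCase tid c hc
    simp only [pack_tokens_py, pack_tokens_py_alt, h0]
    simp
  · exact absurd hc hpre
  · by_cases hnil : tid = []
    · subst hnil
      have h0 : PySem.List.pyRange 0 ((List.length ([] : List Int)) : Int) c = [] := by
        rw [PySem.List.pyRange_of_pos _ _ hc]; simp
      simp only [pack_tokens_py, pack_tokens_py_alt, h0]
      simp
    · exact pvMain tid c pad hc hnil
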